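-- pv_equiv track=rewrite | github.com/Huggan00/adventofcode2024 | solutions/day01.py | get_similarity
-- ===== SOURCE A (Python) =====
-- def get_frequencies(list):
--     frequencies = {}
--     for value in list:
--         if value in frequencies:
--             frequencies[value] += 1
--         else:
--             frequencies[value] = 1
--
--     return frequencies
--
-- def get_similarity(list1, list2):
--     frequencies1 = get_frequencies(list1)
--     frequencies2 = get_frequencies(list2)
--
--     total_similarity = 0
--     for value in frequencies1:
--         if value in frequencies2:
--             frequency1 = frequencies1[value]
--             frequency2 = frequencies2[value]
--             similarity = value * frequency1 * frequency2
--             total_similarity += similarity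
--
--     return total_similarity
-- ===== SOURCE B (Python) =====
-- def get_similarity(list1, list2):
--     counts2 = {}
--     for v in list2:
--         counts2[v] = counts2.get(v, 0) + 1
--     total = 0
--     for v in list1:
--         total += v * counts2.get(v, 0)
--     return total
-- ===== Notes on version B (the rewrite author's own statement) =====
-- stated objective: simpler
-- what changed: B builds a frequency table for list2 only and sums v*count2(v) over the raw elements of list1, removing A's second frequency table and the key-intersection loop.
import Mathlib
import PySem

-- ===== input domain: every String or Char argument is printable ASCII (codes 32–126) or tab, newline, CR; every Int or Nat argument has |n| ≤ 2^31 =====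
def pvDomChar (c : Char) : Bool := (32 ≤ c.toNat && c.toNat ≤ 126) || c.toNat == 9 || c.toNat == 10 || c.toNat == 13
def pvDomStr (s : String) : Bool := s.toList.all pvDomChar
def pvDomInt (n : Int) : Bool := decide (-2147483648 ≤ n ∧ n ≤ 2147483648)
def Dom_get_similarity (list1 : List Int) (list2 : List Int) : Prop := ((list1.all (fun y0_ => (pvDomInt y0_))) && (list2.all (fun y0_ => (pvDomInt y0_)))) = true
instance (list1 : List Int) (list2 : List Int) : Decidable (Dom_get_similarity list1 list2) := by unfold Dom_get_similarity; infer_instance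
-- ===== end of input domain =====

-- B replaces A's two frequency tables + key-intersection loop by one table for list2 and a direct sum over list1 (objective: simpler).

-- ===== PORT A =====
-- get_frequencies: 'if value in frequencies: frequencies[value] += 1 else: frequencies[value] = 1'
def get_frequencies (list : List Int) : PySem.Dict Int Int :=
  list.foldl
    (fun frequencies value =>
      if frequencies.contains value then
        -- frequencies[value] += 1 : the key is present, so d[value] = frequencies.getD value 0
        frequencies.insert value (frequencies.getD value 0 + 1)
      else
        frequencies.insert value 1)
    PySem.Dict.empty

def get_similarity (list1 : List Int) (list2 : List Int) : Int :=
  let frequencies1 := get_frequencies list1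
  let frequencies2 := get_frequencies list2
  frequencies1.keys.foldl
    (fun total_similarity value =>
      if frequencies2.contains value then
        -- keys are present in their own dict, so d[value] = getD value 0
        total_similarity + value * frequencies1.getD value 0 * frequencies2.getD value 0
      else
        total_similarity)
    0

-- ===== PORT B =====
def get_similarity_alt (list1 : List Int) (list2 : List Int) : Int :=
  let counts2 := list2.foldl (fun d v => d.insert v (d.getD v 0 + 1)) PySem.Dict.empty
  list1.foldl (fun total v => total + v * counts2.getD v 0) 0

-- ===== PRECONDITION & SPEC =====
def Spec_get_similarity (list1 : List Int) (list2 : List Int) (out : Int) : Prop := out = get_similarity_alt list1 list2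
instance (list1 : List Int) (list2 : List Int) (out : Int) : Decidable (Spec_get_similarity list1 list2 out) := by unfold Spec_get_similarity; infer_instance

-- ===== CLAIM (what is proved, stated in full; the proofs are below) =====
def Claim_equal_get_similarity : Prop := ∀ (list1 : List Int) (list2 : List Int), Dom_get_similarity list1 list2 → Spec_get_similarity list1 list2 (get_similarity list1 list2)

-- ===== LEMMAS AND PROOFS =====

-- A's by-hand frequency loop is Counter
theorem get_frequencies_eq_counter (l : List Int) : get_frequencies l = PySem.Dict.counter l := by
  unfold get_frequencies
  rw [← PySem.Dict.foldl_insert_getD_add_one_eq_counter]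
  congr 1
  funext d v
  by_cases h : d.contains v
  · simp [h]
  · simp [h, PySem.Dict.getD_of_not_contains d 0 (by simpa using h)]

-- indicator sum over a nodup list containing x
theorem sum_map_ite_eq (f : Int → Int) (d : List Int) (hd : d.Nodup) (x : Int) (hx : x ∈ d) :
    (d.map (fun v => if v = x then f v else 0)).sum = f x := by
  induction d with
  | nil => cases hx
  | cons a d ih =>
    simp only [List.map_cons, List.sum_cons]
    by_cases hax : a = x
    · have hnot : a ∉ d := (List.nodup_cons.mp hd).1
      have hz : (d.map (fun v => if v = x then f v else 0)).sum = 0 := by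
        apply List.sum_eq_zero
        intro y hy
        rcases List.mem_map.mp hy with ⟨v, hv, rfl⟩
        have : v ≠ x := fun e => hnot ((e.trans hax.symm) ▸ hv)
        simp [this]
      simp [hax, hz]
    · have hxd : x ∈ d := by
        rcases List.mem_cons.mp hx with h | h
        · exact absurd h.symm hax
        · exact h
      rw [if_neg hax, ih (List.nodup_cons.mp hd).2 hxd]
      ring

-- sum over distinct values weighted by multiplicity = sum over raw elements
theorem sum_count_mul (f : Int → Int) (l d : List Int) (hd : d.Nodup)
    (hsub : ∀ v ∈ l, v ∈ d) :
    (d.map (fun v => (l.count v : Int) * f v)).sum = (l.map f).sum := by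
  induction l with
  | nil => simp
  | cons x l ih =>
    have hx : x ∈ d := hsub x (List.mem_cons_self ..)
    have hsub' : ∀ v ∈ l, v ∈ d := fun v hv => hsub v (List.mem_cons_of_mem _ hv)
    have hcount : ∀ v : Int, ((x :: l).count v : Int) = (l.count v : Int) + (if v = x then 1 else 0) := by
      intro v
      by_cases h : v = x
      · subst h; simp [List.count_cons_self]
      · rw [List.count_cons_of_ne (fun e => h e.symm)]; simp [h]
    calc (d.map (fun v => ((x :: l).count v : Int) * f v)).sum
        = (d.map (fun v => (l.count v : Int) * f v + (if v = x then f v else 0))).sum := by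
          apply congrArg
          apply List.map_congr_left
          intro v _
          rw [hcount v]
          by_cases h : v = x <;> simp [h] <;> ring
      _ = (d.map (fun v => (l.count v : Int) * f v)).sum
            + (d.map (fun v => if v = x then f v else 0)).sum := by
          rw [← List.sum_map_add]
      _ = (l.map f).sum + f x := by rw [ih hsub', sum_map_ite_eq f d hd x hx]
      _ = ((x :: l).map f).sum := by simp [List.map_cons]; ring

-- ===== VERDICT (by name: the statement is the Claim_ definition above) =====
theorem get_similarity_spec : Claim_equal_get_similarity := by
  intro list1 list2 _
  unfold Spec_get_similarity get_similarity get_similarity_alt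
  rw [get_frequencies_eq_counter, get_frequencies_eq_counter,
      PySem.Dict.foldl_insert_getD_add_one_eq_counter]
  -- A's intersection loop: fold function simplifies to unconditional add
  have hA : (PySem.Dict.counter list1).keys.foldl
      (fun total_similarity value =>
        if (PySem.Dict.counter list2).contains value then
          total_similarity + value * (PySem.Dict.counter list1).getD value 0 * (PySem.Dict.counter list2).getD value 0
        else total_similarity) 0
      = ((PySem.Dict.counter list1).keys.map
          (fun v => (list1.count v : Int) * (v * (list2.count v : Int)))).sum := by
    have : (fun (total_similarity : Int) (value : Int) =>
        if (PySem.Dict.counter list2).contains value then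
          total_similarity + value * (PySem.Dict.counter list1).getD value 0 * (PySem.Dict.counter list2).getD value 0
        else total_similarity)
        = fun total v => total + (list1.count v : Int) * (v * (list2.count v : Int)) := by
      funext total v
      by_cases h : v ∈ list2
      · simp [PySem.Dict.contains_counter, h, PySem.Dict.getD_counter]; ring
      · have hc : list2.count v = 0 := List.count_eq_zero.mpr h
        simp [PySem.Dict.contains_counter, h, hc]
    rw [this, PySem.List.foldl_add]
    simp
  rw [hA, PySem.List.foldl_add,
      sum_count_mul (fun v => v * (list2.count v : Int)) list1 (PySem.Dict.counter list1).keys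
        (by rw [PySem.Dict.keys_counter]; exact PySem.Set.nodup_ofList list1)
        (by intro v hv; simp [PySem.Dict.keys_counter, PySem.Set.mem_ofList]; exact hv)]
  simp [PySem.Dict.getD_counter]
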